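-- pv_equiv track=rewrite | github.com/beka4kaa/lea | lea/mcp_ui_aggregator/providers/shadcn_enhanced.py | _infer_category_from_name
-- ===== SOURCE A (Python) =====
-- def _infer_category_from_name(name: str) -> str:
--     """Infer component category from name."""
--     name_lower = name.lower()
--
--     if any(word in name_lower for word in ["button", "btn"]):
--         return "buttons"
--     elif any(word in name_lower for word in ["input", "form", "field", "select", "textarea"]):
--         return "forms"
--     elif any(word in name_lower for word in ["card", "dialog", "modal", "sheet", "popover"]):
--         return "overlays"
--     elif any(word in name_lower for word in ["nav", "menu", "breadcrumb", "tabs"]):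
--         return "navigation"
--     elif any(word in name_lower for word in ["table", "badge", "avatar", "progress"]):
--         return "data_display"
--     elif any(word in name_lower for word in ["alert", "toast", "notification"]):
--         return "feedback"
--     else:
--         return "other"
-- ===== SOURCE B (Python) =====
-- _CATEGORIES = ("buttons", "forms", "overlays", "navigation", "data_display", "feedback")
--
-- _KEYWORD_PRIORITY = {
--     "button": 0, "btn": 0,
--     "input": 1, "form": 1, "field": 1, "select": 1, "textarea": 1,
--     "card": 2, "dialog": 2, "modal": 2, "sheet": 2, "popover": 2,
--     "nav": 3, "menu": 3, "breadcrumb": 3, "tabs": 3,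
--     "table": 4, "badge": 4, "avatar": 4, "progress": 4,
--     "alert": 5, "toast": 5, "notification": 5,
-- }
--
--
-- def _infer_category_from_name(name: str) -> str:
--     """Infer component category: best (lowest-priority) keyword hit wins."""
--     name_lower = name.lower()
--     best = min(
--         (prio for kw, prio in _KEYWORD_PRIORITY.items() if kw in name_lower),
--         default=None,
--     )
--     return "other" if best is None else _CATEGORIES[best]
-- ===== Notes on version B (the rewrite author's own statement) =====
-- stated objective: alternative
-- what changed: Replaces the early-return elif chain over keyword groups by a min-reduction: scan every keyword once, take the minimum priority among all matching keywords, and index that into a category tuple ('other' if no keyword matches).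
import Mathlib
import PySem

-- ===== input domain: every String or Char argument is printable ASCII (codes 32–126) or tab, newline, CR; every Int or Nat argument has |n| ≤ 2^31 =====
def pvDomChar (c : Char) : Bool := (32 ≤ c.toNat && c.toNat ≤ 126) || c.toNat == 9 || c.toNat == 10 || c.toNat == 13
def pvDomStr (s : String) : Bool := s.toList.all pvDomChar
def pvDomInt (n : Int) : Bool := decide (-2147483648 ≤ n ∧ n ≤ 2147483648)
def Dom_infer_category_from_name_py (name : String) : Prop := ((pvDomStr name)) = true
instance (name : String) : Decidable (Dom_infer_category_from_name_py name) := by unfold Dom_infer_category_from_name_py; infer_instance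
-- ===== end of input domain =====

-- B replaces A's early-return elif chain by a full keyword scan taking the minimum matching priority, then indexing a category tuple (alternative decomposition, same cost).


-- ===== PORT A =====
def infer_category_from_name_py (name : String) : String :=
  let name_lower := PySem.Str.lower name
  if ["button", "btn"].any (fun word => PySem.Str.isIn word name_lower) then
    "buttons"
  else if ["input", "form", "field", "select", "textarea"].any (fun word => PySem.Str.isIn word name_lower) then
    "forms"
  else if ["card", "dialog", "modal", "sheet", "popover"].any (fun word => PySem.Str.isIn word name_lower) then
    "overlays"
  else if ["nav", "menu", "breadcrumb", "tabs"].any (fun word => PySem.Str.isIn word name_lower) then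
    "navigation"
  else if ["table", "badge", "avatar", "progress"].any (fun word => PySem.Str.isIn word name_lower) then
    "data_display"
  else if ["alert", "toast", "notification"].any (fun word => PySem.Str.isIn word name_lower) then
    "feedback"
  else
    "other"

-- ===== PORT B =====
-- _CATEGORIES tuple
def pvCategories : List String :=
  ["buttons", "forms", "overlays", "navigation", "data_display", "feedback"]

-- _KEYWORD_PRIORITY dict, in insertion order
def pvKeywordPriority : List (String × Nat) :=
  [ ("button", 0), ("btn", 0)
  , ("input", 1), ("form", 1), ("field", 1), ("select", 1), ("textarea", 1)
  , ("card", 2), ("dialog", 2), ("modal", 2), ("sheet", 2), ("popover", 2)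
  , ("nav", 3), ("menu", 3), ("breadcrumb", 3), ("tabs", 3)
  , ("table", 4), ("badge", 4), ("avatar", 4), ("progress", 4)
  , ("alert", 5), ("toast", 5), ("notification", 5) ]

-- min(..., default=None) over the priorities of matching keywords
def pvMinMatch (name_lower : String) : List (String × Nat) → Option Nat → Option Nat
  | [], acc => acc
  | (kw, p) :: rest, acc =>
      pvMinMatch name_lower rest
        (if PySem.Str.isIn kw name_lower then
           match acc with
           | none => some p
           | some q => some (min q p)
         else acc)

def infer_category_from_name_py_alt (name : String) : String :=
  let name_lower := PySem.Str.lower name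
  match pvMinMatch name_lower pvKeywordPriority none with
  | none => "other"
  | some best => pvCategories.getD best ""

-- ===== PRECONDITION & SPEC =====
def Spec_infer_category_from_name_py (name : String) (out : String) : Prop := out = infer_category_from_name_py_alt name
instance (name : String) (out : String) : Decidable (Spec_infer_category_from_name_py name out) := by unfold Spec_infer_category_from_name_py; infer_instance

-- ===== CLAIM (what is proved, stated in full; the proofs are below) =====
def Claim_equal_infer_category_from_name_py : Prop := ∀ (name : String), Dom_infer_category_from_name_py name → Spec_infer_category_from_name_py name (infer_category_from_name_py name)

-- ===== LEMMAS AND PROOFS =====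

-- proof-side helper: the first matching keyword's priority
def pvFirst (low : String) : List (String × Nat) → Option Nat
  | [] => none
  | (kw, p) :: rest => if PySem.Str.isIn kw low then some p else pvFirst low rest

-- accumulator already ≤ every remaining priority ⇒ the fold keeps it
theorem pvMinMatch_absorb (low : String) (l : List (String × Nat)) (a : Nat)
    (h : ∀ kp ∈ l, a ≤ kp.2) : pvMinMatch low l (some a) = some a := by
  induction l with
  | nil => rfl
  | cons kp rest ih =>
      obtain ⟨kw, p⟩ := kp
      have hap : a ≤ p := h (kw, p) (List.mem_cons_self ..)
      have hrest : ∀ kp ∈ rest, a ≤ kp.2 := fun kp hm => h kp (List.mem_cons_of_mem _ hm)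
      simp only [pvMinMatch]
      split
      · simpa [Nat.min_eq_left hap] using ih hrest
      · exact ih hrest

-- on a list whose priorities are nondecreasing, the min-fold is the first match
theorem pvMinMatch_sorted (low : String) (l : List (String × Nat))
    (h : List.Pairwise (fun a b => a.2 ≤ b.2) l) :
    pvMinMatch low l none = pvFirst low l := by
  induction l with
  | nil => rfl
  | cons kp rest ih =>
      obtain ⟨kw, p⟩ := kp
      rw [List.pairwise_cons] at h
      simp only [pvMinMatch, pvFirst]
      split
      · exact pvMinMatch_absorb low rest p h.1
      · exact ih h.2

theorem pvKeywordPriority_sorted :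
    List.Pairwise (fun a b => a.2 ≤ b.2) pvKeywordPriority := by decide

-- pvFirst over a block of keywords sharing one priority = one `.any` test
theorem pvFirst_const (low : String) (g : List String) (p : Nat) (rest : List (String × Nat)) :
    pvFirst low (g.map (fun kw => (kw, p)) ++ rest)
      = if g.any (fun word => PySem.Str.isIn word low) then some p else pvFirst low rest := by
  induction g with
  | nil => simp only [List.map_nil, List.nil_append, List.any_nil, if_neg Bool.false_ne_true]
  | cons kw g' ih =>
      simp only [List.map_cons, List.cons_append, pvFirst, List.any_cons]
      by_cases h : PySem.Str.isIn kw low = true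
      · simp only [h, Bool.true_or, if_true]
      · have hf : PySem.Str.isIn kw low = false := (Bool.not_eq_true _).mp h
        rw [if_neg h, ih]
        simp only [hf, Bool.false_or]

-- the keyword table is six constant-priority blocks
theorem pvKeywordPriority_blocks :
    pvKeywordPriority
      = ["button", "btn"].map (fun kw => (kw, 0))
        ++ (["input", "form", "field", "select", "textarea"].map (fun kw => (kw, 1))
        ++ (["card", "dialog", "modal", "sheet", "popover"].map (fun kw => (kw, 2))
        ++ (["nav", "menu", "breadcrumb", "tabs"].map (fun kw => (kw, 3))
        ++ (["table", "badge", "avatar", "progress"].map (fun kw => (kw, 4))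
        ++ (["alert", "toast", "notification"].map (fun kw => (kw, 5))
        ++ ([] : List (String × Nat))))))) := by rfl

-- ===== VERDICT (by name: the statement is the Claim_ definition above) =====
set_option maxHeartbeats 1000000 in
theorem infer_category_from_name_py_spec : Claim_equal_infer_category_from_name_py := by
  intro name hdom
  clear hdom
  unfold Spec_infer_category_from_name_py infer_category_from_name_py infer_category_from_name_py_alt
  simp only [pvMinMatch_sorted _ _ pvKeywordPriority_sorted]
  simp only [pvKeywordPriority_blocks, pvFirst_const, pvFirst]
  split_ifs <;> rfl
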